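-- pv_equiv track=rewrite | github.com/mr-szgz/stash-plugins | .agents/skills/research-mirror/scripts/list_research_bundles.py | select_latest
-- ===== SOURCE A (Python) =====
-- def select_latest(records: list[dict[str, object]]) -> list[dict[str, object]]:
--     latest: dict[str, dict[str, object]] = {}
--     for record in records:
--         topic = str(record["topic_slug"])
--         previous = latest.get(topic)
--         if previous is None:
--             latest[topic] = record
--             continue
--         prev_date = previous.get("bundle_date")
--         curr_date = record.get("bundle_date")
--         if curr_date and (not prev_date or str(curr_date) > str(prev_date)):
--             latest[topic] = record
--     return sorted(latest.values(), key=lambda item: (str(item["topic_slug"]), str(item["bundle_date"] or "")))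
-- ===== SOURCE B (Python) =====
-- def select_latest(records: list[dict[str, object]]) -> list[dict[str, object]]:
--     # group records by topic in encounter order, then pick each group's winner with max()
--     groups: dict[str, list[dict[str, object]]] = {}
--     for record in records:
--         groups.setdefault(str(record["topic_slug"]), []).append(record)
--     winners = [
--         max(group, key=lambda r: (1 if r.get("bundle_date") else 0, str(r.get("bundle_date") or "")))
--         for group in groups.values()
--     ]
--     return sorted(winners, key=lambda item: (str(item["topic_slug"]), str(item["bundle_date"] or "")))
-- ===== Notes on version B (the rewrite author's own statement) =====
-- stated objective: alternative
-- what changed: B replaces A's single-pass keep-the-best fold over a latest dict with a two-phase group-by-topic pass followed by a per-group max() with a (truthiness, date-string) tuple key, then the same final sort.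
import Mathlib
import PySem

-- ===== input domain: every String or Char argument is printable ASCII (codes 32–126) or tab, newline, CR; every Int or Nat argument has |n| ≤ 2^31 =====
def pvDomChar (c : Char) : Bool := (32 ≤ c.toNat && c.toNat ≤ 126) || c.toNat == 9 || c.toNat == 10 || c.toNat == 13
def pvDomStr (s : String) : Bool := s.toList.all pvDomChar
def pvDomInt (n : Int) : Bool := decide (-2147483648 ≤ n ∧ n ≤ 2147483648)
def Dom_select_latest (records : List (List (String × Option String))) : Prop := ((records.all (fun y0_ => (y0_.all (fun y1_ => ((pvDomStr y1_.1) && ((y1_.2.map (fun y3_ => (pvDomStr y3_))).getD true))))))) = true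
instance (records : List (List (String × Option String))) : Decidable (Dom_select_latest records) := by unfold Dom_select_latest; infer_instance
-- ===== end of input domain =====

-- B groups the records by topic first and then picks each group's winner with a single max(),
-- instead of A's one-pass keep-the-best fold; same return value (alternative decomposition, no speed claim).

-- shared primitives modelling the Python built-ins on a record (an association list, first match wins)
-- record.get(k) / record[k]: missing key collapses to `none`; Pre_ excludes the subscripts that would raise KeyError
def pvGet (r : List (String × Option String)) (k : String) : Option String :=
  ((PySem.Dict.mk r).get? k).getD none
-- str(v) for v : str | None
def pvStr : Option String → String
  | none => "None"
  | some s => s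
-- Python truthiness of v : str | None
def pvTruthy : Option String → Bool
  | none => false
  | some s => !(s == "")
-- str(v or "")
def pvOrEmpty (v : Option String) : String := if pvTruthy v then pvStr v else ""
-- str(record["topic_slug"])  (key present under Pre_)
def pvTopic (r : List (String × Option String)) : String := pvStr (pvGet r "topic_slug")
def pvHasKey (r : List (String × Option String)) (k : String) : Bool :=
  ((PySem.Dict.mk r).get? k).isSome

-- ===== PORT A =====
-- the body of A's `for record in records` loop over the dict `latest`
def pvStepA (latest : PySem.Dict String (List (String × Option String)))
    (record : List (String × Option String)) : PySem.Dict String (List (String × Option String)) :=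
  let topic := pvTopic record
  match latest.get? topic with
  | none => latest.insert topic record
  | some previous =>
      let prev_date := pvGet previous "bundle_date"
      let curr_date := pvGet record "bundle_date"
      if pvTruthy curr_date && (!pvTruthy prev_date || decide (pvStr prev_date < pvStr curr_date)) then
        latest.insert topic record
      else latest

def select_latest (records : List (List (String × Option String))) : List (List (String × Option String)) :=
  let latest := records.foldl pvStepA PySem.Dict.empty
  PySem.List.sorted2 latest.values
    (fun item => pvStr (pvGet item "topic_slug"))
    (fun item => pvOrEmpty (pvGet item "bundle_date")) false

-- ===== PORT B =====
-- key of B's max(): (1 if r.get("bundle_date") else 0, str(r.get("bundle_date") or ""))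
def pvK1 (r : List (String × Option String)) : Int :=
  if pvTruthy (pvGet r "bundle_date") then 1 else 0
def pvK2 (r : List (String × Option String)) : String := pvOrEmpty (pvGet r "bundle_date")
-- max(group, key=...) (group is nonempty whenever it comes out of `groups`)
def pvPick (g : List (List (String × Option String))) : List (String × Option String) :=
  (PySem.List.max2? g pvK1 pvK2).getD []
-- groups.setdefault(topic, []).append(record)
def pvStepG (g : PySem.Dict String (List (List (String × Option String))))
    (r : List (String × Option String)) : PySem.Dict String (List (List (String × Option String))) :=
  g.modify (pvTopic r) [] (· ++ [r])

def select_latest_alt (records : List (List (String × Option String))) : List (List (String × Option String)) :=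
  let groups := records.foldl pvStepG PySem.Dict.empty
  let winners := groups.values.map pvPick
  PySem.List.sorted2 winners
    (fun item => pvStr (pvGet item "topic_slug"))
    (fun item => pvOrEmpty (pvGet item "bundle_date")) false

-- ===== PRECONDITION & SPEC =====
-- Pre_ excludes exactly the KeyError inputs of A: a record missing "topic_slug", or a record missing
-- "bundle_date" that is the first of its topic and is never superseded by a later record of the same
-- topic carrying a truthy bundle_date (that record wins, and the final sort's item["bundle_date"] raises).
def Pre_select_latest (records : List (List (String × Option String))) : Prop :=
  (∀ r ∈ records, pvHasKey r "topic_slug" = true) ∧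
  (∀ i < records.length, pvHasKey (records.getD i []) "bundle_date" = false →
    (∀ j < i, pvTopic (records.getD j []) ≠ pvTopic (records.getD i [])) →
    ∃ j < records.length, i < j ∧ pvTopic (records.getD j []) = pvTopic (records.getD i []) ∧
      pvTruthy (pvGet (records.getD j []) "bundle_date") = true)
instance (records : List (List (String × Option String))) : Decidable (Pre_select_latest records) := by
  unfold Pre_select_latest; infer_instance

def pvWitness_select_latest : (List (List (String × Option String))) :=
  [[("topic_slug", some "a"), ("bundle_date", some "2024")],
   [("topic_slug", some "b"), ("bundle_date", none)],
   [("topic_slug", some "b"), ("bundle_date", some "2023")]]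

def Spec_select_latest (records : List (List (String × Option String))) (out : List (List (String × Option String))) : Prop := out = select_latest_alt records
instance (records : List (List (String × Option String))) (out : List (List (String × Option String))) : Decidable (Spec_select_latest records out) := by unfold Spec_select_latest; infer_instance

-- ===== CLAIM (what is proved, stated in full; the proofs are below) =====
def Claim_equal_select_latest : Prop := ∀ (records : List (List (String × Option String))), Dom_select_latest records → Pre_select_latest records → Spec_select_latest records (select_latest records)

-- ===== LEMMAS AND PROOFS =====

-- the coupling invariant between A's `latest` and B's `groups`
def pvInv (l : PySem.Dict String (List (String × Option String)))
    (g : PySem.Dict String (List (List (String × Option String)))) : Prop :=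
  l.items = g.items.map (fun p => (p.1, pvPick p.2)) ∧ g.keys.Nodup ∧ ∀ p ∈ g.items, p.2 ≠ []

theorem pvGet?_of_inv {l : PySem.Dict String (List (String × Option String))}
    {g : PySem.Dict String (List (List (String × Option String)))}
    (h : l.items = g.items.map (fun p => (p.1, pvPick p.2))) (k : String) :
    l.get? k = (g.get? k).map pvPick := by
  simp only [PySem.Dict.get?, h, List.find?_map]
  have : ((fun p : String × List (String × Option String) => p.1 == k) ∘
      (fun p : String × List (List (String × Option String)) => (p.1, pvPick p.2)))
      = fun p => p.1 == k := rfl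
  rw [this]
  cases g.items.find? (fun p => p.1 == k) <;> rfl

-- A's replacement test coincides with the lexicographic comparison of B's max-key
theorem pvCond_eq (prev curr : List (String × Option String)) :
    (pvTruthy (pvGet curr "bundle_date") && (!pvTruthy (pvGet prev "bundle_date") ||
      decide (pvStr (pvGet prev "bundle_date") < pvStr (pvGet curr "bundle_date"))))
    = (decide (pvK1 prev < pvK1 curr) || !decide (pvK1 curr < pvK1 prev) && decide (pvK2 prev < pvK2 curr)) := by
  cases hp : pvTruthy (pvGet prev "bundle_date") <;> cases hc : pvTruthy (pvGet curr "bundle_date") <;>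
    simp [pvK1, pvK2, pvOrEmpty, hp, hc]

theorem pvPick_append (G : List (List (String × Option String))) (r : List (String × Option String))
    (m : List (String × Option String)) (hm : PySem.List.max2? G pvK1 pvK2 = some m) :
    pvPick (G ++ [r]) =
      if decide (pvK1 m < pvK1 r) || !decide (pvK1 r < pvK1 m) && decide (pvK2 m < pvK2 r) then r else m := by
  simp only [pvPick, PySem.List.max2?, List.foldl_append] at *
  rw [hm]
  simp only [List.foldl]
  split <;> rfl

theorem pvMax2_isSome (G : List (List (String × Option String))) (hG : G ≠ []) :
    (PySem.List.max2? G pvK1 pvK2).isSome = true := by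
  rcases G with _ | ⟨x, t⟩
  · exact absurd rfl hG
  · clear hG
    simp only [PySem.List.max2?, List.foldl]
    induction t generalizing x with
    | nil => rfl
    | cons y t ih =>
        simp only [List.foldl]
        split <;> exact ih _

theorem pvInv_step (l : PySem.Dict String (List (String × Option String)))
    (g : PySem.Dict String (List (List (String × Option String))))
    (r : List (String × Option String)) (h : pvInv l g) : pvInv (pvStepA l r) (pvStepG g r) := by
  obtain ⟨hitems, hnd, hne⟩ := h
  have hget := pvGet?_of_inv hitems
  have hcont : ∀ k, l.contains k = g.contains k := by
    intro k
    rw [PySem.Dict.contains_eq_isSome_get?, PySem.Dict.contains_eq_isSome_get?, hget]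
    cases g.get? k <;> rfl
  set t := pvTopic r with ht
  cases hgt : g.get? t with
  | none =>
      have hlt : l.get? t = none := by rw [hget, hgt]; rfl
      have hcf : g.contains t = false := by
        rw [PySem.Dict.contains_eq_isSome_get?, hgt]; rfl
      have hlcf : l.contains t = false := by rw [hcont, hcf]
      have hA : pvStepA l r = l.insert t r := by
        simp only [pvStepA]; rw [← ht, hlt]
      have hB : pvStepG g r = g.insert t [r] := by
        simp only [pvStepG, PySem.Dict.modify, PySem.Dict.getD]; rw [← ht, hgt]; rfl
      rw [hA, hB]
      refine ⟨?_, ?_, ?_⟩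
      · rw [PySem.Dict.items_insert_of_not_contains l r hlcf,
          PySem.Dict.items_insert_of_not_contains g [r] hcf, List.map_append, hitems]
        rfl
      · have : (g.insert t [r]).keys = g.keys ++ [t] := by
          simp [PySem.Dict.keys, PySem.Dict.items_insert_of_not_contains g [r] hcf]
        rw [this, List.nodup_append]
        refine ⟨hnd, List.nodup_singleton t, ?_⟩
        intro a ha b hb
        rw [List.mem_singleton] at hb
        subst hb
        intro h
        subst h
        exact (PySem.Dict.get?_eq_none_iff_not_mem_keys g t).mp hgt ha
      · intro p hp
        rw [PySem.Dict.items_insert_of_not_contains g [r] hcf, List.mem_append] at hp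
        rcases hp with hp | hp
        · exact hne p hp
        · simp only [List.mem_singleton] at hp; subst hp; simp
  | some G =>
      have hmemG : (t, G) ∈ g.items := PySem.Dict.mem_items_of_get?_eq_some g hgt
      have hGne : G ≠ [] := hne _ hmemG
      obtain ⟨m, hm⟩ := Option.isSome_iff_exists.mp (pvMax2_isSome G hGne)
      have hpick : pvPick G = m := by simp [pvPick, hm]
      have hlt : l.get? t = some m := by rw [hget, hgt, Option.map_some, hpick]
      have hct : g.contains t = true := by
        rw [PySem.Dict.contains_eq_isSome_get?, hgt]; rfl
      have hlct : l.contains t = true := by rw [hcont, hct]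
      have hgetD : g.getD t [] = G := by rw [PySem.Dict.getD, hgt]; rfl
      have hpickA : pvPick (G ++ [r]) =
          if decide (pvK1 m < pvK1 r) || !decide (pvK1 r < pvK1 m) && decide (pvK2 m < pvK2 r) then r else m :=
        pvPick_append G r m hm
      have hkeysB : (g.insert t (G ++ [r])).keys = g.keys := by
        simp only [PySem.Dict.keys, PySem.Dict.items_insert_of_contains g (G ++ [r]) hct, List.map_map]
        apply List.map_congr_left
        intro p _
        by_cases hp : p.1 = t
        · simp [hp]
        · simp [Function.comp, hp]
      have hneB : ∀ p ∈ (g.insert t (G ++ [r])).items, p.2 ≠ [] := by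
        intro p hp
        rw [PySem.Dict.items_insert_of_contains g (G ++ [r]) hct, List.mem_map] at hp
        obtain ⟨q, hq, hqe⟩ := hp
        by_cases h1 : q.1 = t
        · rw [h1] at hqe
          simp at hqe
          subst hqe
          simp
        · rw [if_neg (by simp [h1])] at hqe
          subst hqe
          exact hne q hq
      -- the unique entry of g at key t is (t, G)
      have huniq : ∀ p ∈ g.items, p.1 = t → p.2 = G := by
        intro p hp hp1
        have : g.get? p.1 = some p.2 :=
          (PySem.Dict.get?_eq_some_iff_mem_items g p.1 p.2 hnd).mpr (by cases p; exact hp)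
        rw [hp1, hgt] at this
        exact (Option.some_inj.mp this).symm
      have hA : pvStepA l r =
          (if pvTruthy (pvGet r "bundle_date") && (!pvTruthy (pvGet m "bundle_date") ||
              decide (pvStr (pvGet m "bundle_date") < pvStr (pvGet r "bundle_date"))) then
            l.insert t r else l) := by
        simp only [pvStepA]; rw [← ht, hlt]
      have hB : pvStepG g r = g.insert t (G ++ [r]) := by
        simp only [pvStepG, PySem.Dict.modify]; rw [← ht, hgetD]
      rw [hA, hB, pvCond_eq m r]
      cases hcmp : (decide (pvK1 m < pvK1 r) || !decide (pvK1 r < pvK1 m) && decide (pvK2 m < pvK2 r)) with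
      | true =>
          have hpr : pvPick (G ++ [r]) = r := by rw [hpickA, hcmp]; rfl
          simp only [if_true]
          refine ⟨?_, by rw [hkeysB]; exact hnd, hneB⟩
          rw [PySem.Dict.items_insert_of_contains l r hlct,
            PySem.Dict.items_insert_of_contains g (G ++ [r]) hct, hitems, List.map_map, List.map_map]
          apply List.map_congr_left
          intro p _
          by_cases hp : p.1 = t
          · simp [Function.comp, hp, hpr]
          · simp [Function.comp, hp]
      | false =>
          have hpr : pvPick (G ++ [r]) = m := by rw [hpickA, hcmp]; rfl
          simp only [Bool.false_eq_true, if_false]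
          refine ⟨?_, by rw [hkeysB]; exact hnd, hneB⟩
          rw [PySem.Dict.items_insert_of_contains g (G ++ [r]) hct, hitems, List.map_map]
          apply List.map_congr_left
          intro p hp
          by_cases h1 : p.1 = t
          · have h2 := huniq p hp h1
            simp [Function.comp, h1, hpr, h2, hpick]
          · simp [Function.comp, h1]

theorem pvInv_foldl (records : List (List (String × Option String)))
    (l : PySem.Dict String (List (String × Option String)))
    (g : PySem.Dict String (List (List (String × Option String)))) (h : pvInv l g) :
    pvInv (records.foldl pvStepA l) (records.foldl pvStepG g) := by
  induction records generalizing l g with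
  | nil => exact h
  | cons r rest ih => exact ih _ _ (pvInv_step l g r h)

theorem pv_values_eq (records : List (List (String × Option String))) :
    (records.foldl pvStepA PySem.Dict.empty).values =
      ((records.foldl pvStepG PySem.Dict.empty).values.map pvPick) := by
  have h := pvInv_foldl records PySem.Dict.empty PySem.Dict.empty
    ⟨rfl, List.nodup_nil, by intro p hp; simp [PySem.Dict.empty] at hp⟩
  obtain ⟨hitems, -, -⟩ := h
  simp only [PySem.Dict.values, hitems, List.map_map]
  rfl

-- ===== VERDICT (by name: the statement is the Claim_ definition above) =====
theorem select_latest_spec : Claim_equal_select_latest := by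
  intro records _ _
  unfold Spec_select_latest select_latest select_latest_alt
  exact congrArg (fun v => PySem.List.sorted2 v (fun item => pvStr (pvGet item "topic_slug"))
    (fun item => pvOrEmpty (pvGet item "bundle_date")) false) (pv_values_eq records)
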